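-- pv_equiv track=rewrite | github.com/Archer222arc/WorkflowBench | mdp_workflow_generator.py | _sort_by_predefined_order
-- ===== SOURCE A (Python) =====
-- from typing import Dict, List, Optional, Any, Tuple, Set
--
-- def _sort_by_predefined_order(operations: List[str]) -> List[str]:
--     """按预定义的逻辑顺序排序操作（备用方案）"""
--     # 保持操作的逻辑顺序
--     operation_order = ['read', 'fetch', 'parse', 'validate', 'filter',
--                     'transform', 'compute', 'aggregate', 'integrate',
--                     'write', 'export', 'cache']
--
--     # 按逻辑顺序排序
--     ordered_operations = []
--     for op_type in operation_order:
--         for op in operations: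
--             if op == op_type or op.startswith(op_type):
--                 if op not in ordered_operations:
--                     ordered_operations.append(op)
--
--     # 添加未在顺序中的操作
--     for op in operations:
--         if op not in ordered_operations:
--             ordered_operations.append(op)
--
--     return ordered_operations
-- ===== SOURCE B (Python) =====
-- from typing import List
--
-- _OPERATION_ORDER = ['read', 'fetch', 'parse', 'validate', 'filter',
--                     'transform', 'compute', 'aggregate', 'integrate',
--                     'write', 'export', 'cache']
--
-- def _rank(op: str) -> int:
--     for i, p in enumerate(_OPERATION_ORDER):
--         if op.startswith(p):
--             return i
--     return len(_OPERATION_ORDER)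
--
-- def _sort_by_predefined_order(operations: List[str]) -> List[str]:
--     """One pass: dedup (first occurrence) then bucket each op by the rank of
--     its first matching prefix; concatenate the buckets."""
--     buckets = [[] for _ in range(len(_OPERATION_ORDER) + 1)]
--     seen = set()
--     for op in operations:
--         if op not in seen:
--             seen.add(op)
--             buckets[_rank(op)].append(op)
--     return [op for bucket in buckets for op in bucket]
-- ===== Notes on version B (the rewrite author's own statement) =====
-- stated objective: faster
-- what changed: Replaces A's 13 passes over the input (each with an O(n) list-membership dedup scan) by a single pass that buckets each operation under the rank of its first matching prefix, using a hash set for dedup, then concatenates the buckets.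
import Mathlib
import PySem

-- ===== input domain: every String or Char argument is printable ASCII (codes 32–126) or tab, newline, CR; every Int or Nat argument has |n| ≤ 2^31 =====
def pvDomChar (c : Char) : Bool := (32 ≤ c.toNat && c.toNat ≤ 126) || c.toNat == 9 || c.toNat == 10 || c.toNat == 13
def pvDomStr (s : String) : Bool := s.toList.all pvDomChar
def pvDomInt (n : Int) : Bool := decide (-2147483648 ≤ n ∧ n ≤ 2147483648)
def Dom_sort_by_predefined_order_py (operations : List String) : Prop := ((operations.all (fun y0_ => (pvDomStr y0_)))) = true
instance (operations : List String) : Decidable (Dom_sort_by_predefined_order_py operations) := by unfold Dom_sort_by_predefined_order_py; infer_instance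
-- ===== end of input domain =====

-- B buckets each operation in ONE pass by the rank of its first matching prefix (set-based dedup),
-- instead of A's 13 passes each scanning the growing output list for membership.

def pvOrder : List String :=
  ["read", "fetch", "parse", "validate", "filter",
   "transform", "compute", "aggregate", "integrate",
   "write", "export", "cache"]

-- ===== PORT A =====
def sort_by_predefined_order_py (operations : List String) : List String :=
  let ordered :=
    pvOrder.foldl (fun acc opType =>
      operations.foldl (fun acc op =>
        if op == opType || PySem.Str.startswith op opType then
          if acc.contains op then acc else acc ++ [op]
        else acc) acc) []
  operations.foldl (fun acc op => if acc.contains op then acc else acc ++ [op]) ordered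

-- ===== PORT B =====
-- _OPERATION_ORDER (Source B keeps its own module-level copy of the list)
def pvOrderAlt : List String :=
  ["read", "fetch", "parse", "validate", "filter",
   "transform", "compute", "aggregate", "integrate",
   "write", "export", "cache"]

-- _rank: first index of a matching prefix, else len(_OPERATION_ORDER)
def pvRankGo (op : String) (ps : List String) (i : Nat) : Nat :=
  match ps with
  | [] => i
  | p :: rest => if PySem.Str.startswith op p then i else pvRankGo op rest (i + 1)

def pvRank (op : String) : Nat := pvRankGo op pvOrderAlt 0

def sort_by_predefined_order_py_alt (operations : List String) : List String :=
  let st :=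
    operations.foldl (fun (st : List (List String) × PySem.Set String) op =>
        if st.2.contains op then st
        else (st.1.modify (pvRank op) (· ++ [op]), st.2.add op))
      (List.replicate (pvOrderAlt.length + 1) [], PySem.Set.empty)
  st.1.flatten

-- ===== PRECONDITION & SPEC =====
def Spec_sort_by_predefined_order_py (operations : List String) (out : List String) : Prop := out = sort_by_predefined_order_py_alt operations
instance (operations : List String) (out : List String) : Decidable (Spec_sort_by_predefined_order_py operations out) := by unfold Spec_sort_by_predefined_order_py; infer_instance

-- ===== CLAIM (what is proved, stated in full; the proofs are below) =====
def Claim_equal_sort_by_predefined_order_py : Prop := ∀ (operations : List String), Dom_sort_by_predefined_order_py operations → Spec_sort_by_predefined_order_py operations (sort_by_predefined_order_py operations)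

-- ===== LEMMAS AND PROOFS =====

-- two strings are "exclusive" if no string starts with both
def pvExcl (p q : String) : Prop :=
  ∀ op : String, PySem.Str.startswith op p = true → PySem.Str.startswith op q = true → False

theorem pv_match_eq (op p : String) :
    (op == p || PySem.Str.startswith op p) = PySem.Str.startswith op p := by
  cases h : op == p
  · simp
  · have h' : op = p := eq_of_beq h
    subst h'
    simp [PySem.Str.startswith, PySem.Chars.startswith, List.isPrefixOf_iff_prefix]

theorem pvOrder_pairwise : List.Pairwise pvExcl pvOrder := by
  have h : List.Pairwise (fun p q : String =>
      p.toList.isPrefixOf q.toList = false ∧ q.toList.isPrefixOf p.toList = false) pvOrder := by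
    decide
  refine h.imp ?_
  rintro p q ⟨h1, h2⟩ op hp hq
  simp only [PySem.Str.startswith, PySem.Chars.startswith, List.isPrefixOf_iff_prefix] at hp hq
  rcases List.prefix_or_prefix_of_prefix hp hq with hpq | hqp
  · rw [← List.isPrefixOf_iff_prefix] at hpq; simp [h1] at hpq
  · rw [← List.isPrefixOf_iff_prefix] at hqp; simp [h2] at hqp

theorem pv_add_of_not_contains {b : List String} {op : String} (hb : b.contains op = false) :
    PySem.Set.add b op = b ++ [op] := by
  unfold PySem.Set.add PySem.Set.contains
  rw [hb]; simp

theorem pv_add_of_contains {b : List String} {op : String} (hb : b.contains op = true) :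
    PySem.Set.add b op = b := by
  unfold PySem.Set.add PySem.Set.contains
  rw [hb]; simp

-- inner loop of A: starting from s ++ b where nothing in s matches m,
-- the matching ops are set-appended after s
theorem pv_inner_split (m : String → Bool) :
    ∀ (ops s b : List String), (∀ x ∈ s, m x = false) →
      ops.foldl (fun acc op =>
          if m op then (if acc.contains op then acc else acc ++ [op]) else acc) (s ++ b)
        = s ++ (ops.filter m).foldl PySem.Set.add b := by
  intro ops
  induction ops with
  | nil => intro s b _; simp
  | cons op rest ih =>
    intro s b hs
    simp only [List.foldl_cons, List.filter_cons]
    cases hm : m op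
    · simp only [Bool.false_eq_true, if_false]
      exact ih s b hs
    · simp only [reduceIte]
      have hns : s.contains op = false := by
        cases hc : s.contains op
        · rfl
        · have h' := hs op (List.contains_iff_mem.mp hc)
          rw [hm] at h'; cases h'
      have hca : (s ++ b).contains op = b.contains op := by
        rw [List.contains_append, hns, Bool.false_or]
      rw [hca]
      cases hb : b.contains op
      · rw [if_neg (by simp), List.append_assoc, ih s (b ++ [op]) hs,
          List.foldl_cons, pv_add_of_not_contains hb]
      · rw [if_pos rfl, ih s b hs, List.foldl_cons, pv_add_of_contains hb]

-- final loop of A: set-appending onto s ++ b only ever appends ops not in s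
theorem pv_add_split :
    ∀ (ops s b : List String),
      ops.foldl (fun acc op => if acc.contains op then acc else acc ++ [op]) (s ++ b)
        = s ++ (ops.filter (fun op => !s.contains op)).foldl PySem.Set.add b := by
  intro ops
  induction ops with
  | nil => intro s b; simp
  | cons op rest ih =>
    intro s b
    simp only [List.foldl_cons, List.filter_cons]
    cases hcs : s.contains op
    · have hca : (s ++ b).contains op = b.contains op := by
        rw [List.contains_append, hcs, Bool.false_or]
      rw [hca]
      simp only [Bool.not_false, reduceIte]
      cases hb : b.contains op
      · rw [if_neg (by simp), List.append_assoc, ih s (b ++ [op]),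
          List.foldl_cons, pv_add_of_not_contains hb]
      · rw [if_pos rfl, ih s b, List.foldl_cons, pv_add_of_contains hb]
    · have hca : (s ++ b).contains op = true := by
        rw [List.contains_append, hcs, Bool.true_or]
      rw [hca, if_pos rfl]
      simp only [Bool.not_true, Bool.false_eq_true, if_false]
      exact ih s b

-- Set.ofList-style folds commute with filter
theorem pv_ofList_filter (m : String → Bool) :
    ∀ (xs s : List String),
      (xs.filter m).foldl PySem.Set.add (s.filter m) = (xs.foldl PySem.Set.add s).filter m := by
  intro xs
  induction xs with
  | nil => intro s; simp
  | cons x rest ih =>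
    intro s
    simp only [List.foldl_cons, List.filter_cons]
    cases hm : m x
    · simp only [Bool.false_eq_true, if_false]
      cases hc : s.contains x
      · rw [pv_add_of_not_contains hc, ← ih (s ++ [x])]
        have hfa : (s ++ [x]).filter m = s.filter m := by
          simp [List.filter_append, hm]
        rw [hfa]
      · rw [pv_add_of_contains hc, ih]
    · simp only [reduceIte, List.foldl_cons]
      have hcf : (s.filter m).contains x = s.contains x := by
        cases hc : s.contains x
        · cases hcf' : (s.filter m).contains x
          · rfl
          · have hx : x ∈ s := (List.mem_filter.mp (List.contains_iff_mem.mp hcf')).1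
            rw [List.contains_iff_mem.mpr hx] at hc; cases hc
        · exact List.contains_iff_mem.mpr
            (List.mem_filter.mpr ⟨List.contains_iff_mem.mp hc, hm⟩)
      cases hc : s.contains x
      · have hcf' : (s.filter m).contains x = false := by rw [hcf, hc]
        rw [pv_add_of_not_contains hcf', pv_add_of_not_contains hc, ← ih (s ++ [x])]
        have hfa : (s ++ [x]).filter m = s.filter m ++ [x] := by
          simp [List.filter_append, hm]
        rw [hfa]
      · have hcf' : (s.filter m).contains x = true := by rw [hcf, hc]
        rw [pv_add_of_contains hcf', pv_add_of_contains hc, ih]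

-- outer loop of A over the (pairwise exclusive) prefix list
theorem pv_outer (ops : List String) :
    ∀ (ps acc : List String), List.Pairwise pvExcl ps →
      (∀ x ∈ acc, ∀ p ∈ ps, PySem.Str.startswith x p = false) →
      ps.foldl (fun acc p =>
          ops.foldl (fun acc op =>
            if PySem.Str.startswith op p then (if acc.contains op then acc else acc ++ [op]) else acc) acc) acc
        = acc ++ (ps.map (fun p =>
            PySem.Set.ofList (ops.filter (fun op => PySem.Str.startswith op p)))).flatten := by
  intro ps
  induction ps with
  | nil => intro acc _ _; simp
  | cons p rest ih =>
    intro acc hpw hacc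
    rcases List.pairwise_cons.mp hpw with ⟨hp, hpw'⟩
    simp only [List.foldl_cons, List.map_cons, List.flatten_cons]
    have h1 : ops.foldl (fun acc op =>
        if PySem.Str.startswith op p then (if acc.contains op then acc else acc ++ [op]) else acc) acc
        = acc ++ PySem.Set.ofList (ops.filter (fun op => PySem.Str.startswith op p)) := by
      have := pv_inner_split (fun op => PySem.Str.startswith op p) ops acc []
        (fun x hx => hacc x hx p (by simp))
      simpa [PySem.Set.ofList, PySem.Set.empty] using this
    rw [h1, ih (acc ++ PySem.Set.ofList (ops.filter (fun op => PySem.Str.startswith op p))) hpw' ?_]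
    · simp
    · intro x hx q hq
      rcases List.mem_append.mp hx with hxa | hxb
      · exact hacc x hxa q (by simp [hq])
      · have hxf : x ∈ ops.filter (fun op => PySem.Str.startswith op p) :=
          (PySem.Set.mem_ofList _ _).mp hxb
        have hswp : PySem.Str.startswith x p = true := (List.mem_filter.mp hxf).2
        cases hsq : PySem.Str.startswith x q
        · rfl
        · exact absurd (hp q hq x hswp hsq) (fun h => h)

theorem pv_rankGo_le (op : String) : ∀ (ps : List String) (i : Nat), i ≤ pvRankGo op ps i := by
  intro ps
  induction ps with
  | nil => intro i; simp [pvRankGo]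
  | cons p rest ih =>
    intro i
    simp only [pvRankGo]
    split
    · omega
    · exact Nat.le_trans (by omega) (ih (i + 1))

theorem pv_rankGo_succ (op : String) :
    ∀ (ps : List String) (i : Nat), pvRankGo op ps (i + 1) = pvRankGo op ps i + 1 := by
  intro ps
  induction ps with
  | nil => intro i; simp [pvRankGo]
  | cons p rest ih =>
    intro i
    simp only [pvRankGo]
    split
    · rfl
    · exact ih (i + 1)

-- the rank buckets, concatenated, are: one bucket per prefix, then the unmatched ops
theorem pv_main :
    ∀ (ps d : List String), List.Pairwise pvExcl ps →
      ((List.range (ps.length + 1)).map (fun i =>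
          d.filter (fun op => pvRankGo op ps 0 == i))).flatten
        = (ps.map (fun p => d.filter (fun op => PySem.Str.startswith op p))).flatten
          ++ d.filter (fun op => ps.all (fun p => !PySem.Str.startswith op p)) := by
  intro ps
  induction ps with
  | nil =>
    intro d _
    simp [pvRankGo, List.range_succ_eq_map]
  | cons p rest ih =>
    intro d hpw
    rcases List.pairwise_cons.mp hpw with ⟨hp, hpw'⟩
    have hzero : (fun op => pvRankGo op (p :: rest) 0 == 0)
        = (fun op => PySem.Str.startswith op p) := by
      funext op
      simp only [pvRankGo]
      cases hsw : PySem.Str.startswith op p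
      · have := pv_rankGo_le op rest 1
        simp only [Bool.false_eq_true, if_false]
        have : pvRankGo op rest 1 ≠ 0 := by omega
        simp [this]
      · simp
    have hsucc : ∀ i : Nat, (fun op => pvRankGo op (p :: rest) 0 == i + 1)
        = (fun op => !PySem.Str.startswith op p && (pvRankGo op rest 0 == i)) := by
      intro i
      funext op
      simp only [pvRankGo]
      cases hsw : PySem.Str.startswith op p
      · simp only [Bool.false_eq_true, if_false, Bool.not_false, Bool.true_and]
        rw [pv_rankGo_succ]
        simp
      · simp
    rw [List.length_cons, List.range_succ_eq_map]
    simp only [List.map_cons, List.flatten_cons, List.map_map]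
    rw [hzero]
    have hmapeq : (List.range (rest.length + 1)).map
          ((fun i => d.filter (fun op => pvRankGo op (p :: rest) 0 == i)) ∘ Nat.succ)
        = (List.range (rest.length + 1)).map (fun i =>
            (d.filter (fun op => !PySem.Str.startswith op p)).filter
              (fun op => pvRankGo op rest 0 == i)) := by
      apply List.map_congr_left
      intro i _
      simp only [Function.comp]
      rw [hsucc i, List.filter_filter]
      apply List.filter_congr
      intro a _
      exact Bool.and_comm _ _
    rw [hmapeq, ih (d.filter (fun op => !PySem.Str.startswith op p)) hpw']
    have hbuckets : rest.map (fun q =>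
          (d.filter (fun op => !PySem.Str.startswith op p)).filter
            (fun op => PySem.Str.startswith op q))
        = rest.map (fun q => d.filter (fun op => PySem.Str.startswith op q)) := by
      apply List.map_congr_left
      intro q hq
      rw [List.filter_filter]
      apply List.filter_congr
      intro op _
      cases hsq : PySem.Str.startswith op q
      · simp
      · cases hsp : PySem.Str.startswith op p
        · simp
        · exact absurd (hp q hq op hsp hsq) (fun h => h)
    have hleft : (d.filter (fun op => !PySem.Str.startswith op p)).filter
          (fun op => rest.all (fun q => !PySem.Str.startswith op q))
        = d.filter (fun op => (p :: rest).all (fun q => !PySem.Str.startswith op q)) := by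
      rw [List.filter_filter]
      apply List.filter_congr
      intro op _
      simp [List.all_cons, Bool.and_comm]
    rw [hbuckets, hleft]
    simp
  
def pvBucketsOf (d : List String) : List (List String) :=
  (List.range 13).map (fun i => d.filter (fun op => pvRank op == i))

theorem pvBucketsOf_nil : pvBucketsOf [] = List.replicate (pvOrderAlt.length + 1) [] := by
  decide

theorem pvBucketsOf_snoc (d : List String) (op : String) :
    (pvBucketsOf d).modify (pvRank op) (· ++ [op]) = pvBucketsOf (d ++ [op]) := by
  apply List.ext_getElem
  · simp [pvBucketsOf, List.length_modify]
  · intro j h1 h2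
    rw [List.getElem_modify]
    simp only [pvBucketsOf, List.getElem_map, List.getElem_range, List.filter_append]
    by_cases h : pvRank op = j
    · simp [h]
    · have : (pvRank op == j) = false := by simp [h]
      simp [h, this]

theorem pv_B_fold (ops : List String) :
    ∀ d : List String,
      ops.foldl (fun (st : List (List String) × PySem.Set String) op =>
          if st.2.contains op then st
          else (st.1.modify (pvRank op) (· ++ [op]), st.2.add op)) (pvBucketsOf d, d)
        = (pvBucketsOf (ops.foldl PySem.Set.add d), ops.foldl PySem.Set.add d) := by
  induction ops with
  | nil => intro d; simp
  | cons op rest ih =>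
    intro d
    simp only [List.foldl_cons]
    cases hc : List.contains d op
    · have hadd : PySem.Set.add d op = d ++ [op] := pv_add_of_not_contains hc
      have hcs : PySem.Set.contains d op = false := hc
      rw [hcs]
      simp only [Bool.false_eq_true, if_false, hadd, pvBucketsOf_snoc]
      exact ih (d ++ [op])
    · have hadd : PySem.Set.add d op = d := pv_add_of_contains hc
      have hcs : PySem.Set.contains d op = true := hc
      rw [hcs]
      simp only [if_true, hadd]
      exact ih d

-- assembly
theorem pv_eq (operations : List String) :
    sort_by_predefined_order_py operations = sort_by_predefined_order_py_alt operations := by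
  unfold sort_by_predefined_order_py sort_by_predefined_order_py_alt
  simp only [pv_match_eq]
  rw [pv_outer operations pvOrder [] pvOrder_pairwise (by intro x hx; cases hx)]
  rw [List.nil_append]
  have hA := pv_add_split operations
    ((pvOrder.map (fun p =>
      PySem.Set.ofList (operations.filter (fun op => PySem.Str.startswith op p)))).flatten) []
  rw [List.append_nil] at hA
  rw [hA]
  -- the matched buckets contain exactly the ops with some matching prefix
  have hfc : operations.filter (fun op =>
        !((pvOrder.map (fun p =>
          PySem.Set.ofList (operations.filter (fun op => PySem.Str.startswith op p)))).flatten.contains op))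
      = operations.filter (fun op => pvOrder.all (fun p => !PySem.Str.startswith op p)) := by
    apply List.filter_congr
    intro op hop
    have hco : ((pvOrder.map (fun p =>
          PySem.Set.ofList (operations.filter (fun op => PySem.Str.startswith op p)))).flatten).contains op
        = pvOrder.any (fun p => PySem.Str.startswith op p) := by
      cases ha : pvOrder.any (fun p => PySem.Str.startswith op p)
      · cases hc : ((pvOrder.map (fun p =>
            PySem.Set.ofList (operations.filter (fun op => PySem.Str.startswith op p)))).flatten).contains op
        · rfl
        · exfalso
          rcases List.mem_flatten.mp (List.contains_iff_mem.mp hc) with ⟨l, hl, hopl⟩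
          rcases List.mem_map.mp hl with ⟨p, hpmem, rfl⟩
          have hmf : op ∈ operations.filter (fun op => PySem.Str.startswith op p) :=
            (PySem.Set.mem_ofList _ _).mp hopl
          have hany : pvOrder.any (fun p => PySem.Str.startswith op p) = true :=
            List.any_eq_true.mpr ⟨p, hpmem, (List.mem_filter.mp hmf).2⟩
          rw [ha] at hany; cases hany
      · rcases List.any_eq_true.mp ha with ⟨p, hpmem, hsw⟩
        apply List.contains_iff_mem.mpr
        apply List.mem_flatten.mpr
        refine ⟨_, List.mem_map.mpr ⟨p, hpmem, rfl⟩, ?_⟩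
        exact (PySem.Set.mem_ofList _ _).mpr (List.mem_filter.mpr ⟨hop, hsw⟩)
    rw [hco, List.not_any_eq_all_not]
  rw [hfc]
  -- commute the Set.ofList folds with the filters
  have hmap : pvOrder.map (fun p =>
        PySem.Set.ofList (operations.filter (fun op => PySem.Str.startswith op p)))
      = pvOrder.map (fun p =>
        (operations.foldl PySem.Set.add []).filter (fun op => PySem.Str.startswith op p)) := by
    apply List.map_congr_left
    intro p _
    have h := pv_ofList_filter (fun op => PySem.Str.startswith op p) operations []
    simp only [List.filter_nil] at h
    unfold PySem.Set.ofList PySem.Set.empty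
    exact h
  rw [hmap]
  have hrest := pv_ofList_filter
    (fun op => pvOrder.all (fun p => !PySem.Str.startswith op p)) operations []
  simp only [List.filter_nil] at hrest
  rw [hrest]
  -- B side
  have he : (PySem.Set.empty : PySem.Set String) = ([] : List String) := rfl
  rw [he, ← pvBucketsOf_nil, pv_B_fold operations []]
  unfold pvBucketsOf pvRank
  simp only [show pvOrderAlt = pvOrder from rfl]
  have h13 : (13 : Nat) = pvOrder.length + 1 := rfl
  rw [h13, pv_main pvOrder (operations.foldl PySem.Set.add []) pvOrder_pairwise]

-- ===== VERDICT (by name: the statement is the Claim_ definition above) =====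
theorem sort_by_predefined_order_py_spec : Claim_equal_sort_by_predefined_order_py := by
  intro operations _
  unfold Spec_sort_by_predefined_order_py
  exact pv_eq operations
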